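-- pv_equiv track=rewrite | github.com/GayeonKimm/CT | Codility/6_TapeEquilibrium.py | solution
-- ===== SOURCE A (Python) =====
-- def solution(A):
--
--     # if two elements
--     if len(A) == 2:
--         return abs(A[0]-A[1])
--
--     arr = []
--     tmp_1 = 0
--     tmp_2 = sum(A)
--     for i in range(len(A)-1):
--         tmp_1 += A[i]
--         tmp_2 -= A[i]
--         arr.append(abs(tmp_1-tmp_2))
--
--     return min(arr)
--     pass
-- ===== SOURCE B (Python) =====
-- def solution(A):
--     # sort the prefix sums, then locate the one closest to total/2 by binary
--     # search: only the two bracketing prefix sums can be optimal.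
--     total = sum(A)
--     P = []
--     s = 0
--     for x in A[:-1]:
--         s += x
--         P.append(s)
--     Q = sorted(P)
--     # hand-written bisect (this module imports nothing): first i with 2*Q[i] >= total
--     lo, hi = 0, len(Q)
--     while lo < hi:
--         mid = (lo + hi) // 2
--         if 2 * Q[mid] < total:
--             lo = mid + 1
--         else:
--             hi = mid
--     cands = []
--     if lo > 0:
--         cands.append(total - 2 * Q[lo - 1])
--     if lo < len(Q):
--         cands.append(2 * Q[lo] - total)
--     return min(cands)
-- ===== Notes on version B (the rewrite author's own statement) =====
-- stated objective: alternative
-- what changed: Instead of scanning every split point's |left-right| difference, B sorts the prefix sums and binary-searches for the one closest to total/2; only the two prefix sums bracketing total/2 can be optimal, so the answer is the min of those (at most two) candidates.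
import Mathlib
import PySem

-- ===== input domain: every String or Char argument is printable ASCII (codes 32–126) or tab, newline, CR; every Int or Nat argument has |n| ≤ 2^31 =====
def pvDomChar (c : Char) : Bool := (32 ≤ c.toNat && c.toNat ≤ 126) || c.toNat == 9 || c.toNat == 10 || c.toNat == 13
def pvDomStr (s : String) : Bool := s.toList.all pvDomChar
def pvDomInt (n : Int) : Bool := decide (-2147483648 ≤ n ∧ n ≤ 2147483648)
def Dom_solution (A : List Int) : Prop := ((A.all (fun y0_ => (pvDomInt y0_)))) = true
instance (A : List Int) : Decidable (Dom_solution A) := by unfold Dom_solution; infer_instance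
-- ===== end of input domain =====

-- B sorts the prefix sums and binary-searches for the one closest to total/2: only the two
-- bracketing prefix sums can minimise |left-right|, so only those two candidates are examined.

-- ===== PORT A =====
def solution (A : List Int) : Int :=
  if A.length == 2 then
    |PySem.List.pyGetD A 0 0 - PySem.List.pyGetD A 1 0|
  else
    let st := (PySem.List.pyRange 0 ((A.length : Int) - 1) 1).foldl
      (fun (st : Int × Int × List Int) i =>
        let t1 := st.1 + PySem.List.pyGetD A i 0
        let t2 := st.2.1 - PySem.List.pyGetD A i 0
        (t1, t2, st.2.2 ++ [|t1 - t2|]))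
      (0, A.sum, [])
    (PySem.List.min? st.2.2 (fun x => x)).getD 0   -- min([]) raises in Python: none outside Pre_

-- ===== PORT B =====
-- prefix sums, as Source B builds them (running sum, append)
def pvAcc (s : Int) : List Int → List Int
  | [] => []
  | x :: xs => (s + x) :: pvAcc (s + x) xs

-- Source B's hand-written bisect loop; lo, hi are Python ints that stay in [0, len(Q)], carried as
-- Nat (exact here); mid = (lo+hi)//2 is in range, so Q[mid] is Q.getD mid 0
def pvBS (Q : List Int) (t : Int) (lo hi : Nat) : Nat :=
  if h : lo < hi then
    if 2 * Q.getD ((lo + hi) / 2) 0 < t then pvBS Q t ((lo + hi) / 2 + 1) hi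
    else pvBS Q t lo ((lo + hi) / 2)
  else lo
termination_by hi - lo
decreasing_by all_goals omega

def solution_alt (A : List Int) : Int :=
  let total := A.sum
  let P := pvAcc 0 (PySem.List.slice A none (some (-1)))    -- A[:-1]
  let Q := PySem.List.sorted P (fun x => x) false
  let lo := pvBS Q total 0 Q.length
  let cands : List Int :=
    (if 0 < lo then [total - 2 * Q.getD (lo - 1) 0] else []) ++
    (if lo < Q.length then [2 * Q.getD lo 0 - total] else [])
  (PySem.List.min? cands (fun x => x)).getD 0   -- min([]) raises in Python: none outside Pre_

-- ===== PRECONDITION & SPEC =====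
-- Pre_ excludes lists of length < 2, on which A raises ValueError (min of an empty list).
def Pre_solution (A : List Int) : Prop := 2 ≤ A.length
instance (A : List Int) : Decidable (Pre_solution A) := by unfold Pre_solution; infer_instance
def pvWitness_solution : List Int := [3, 1, 2, 4, 3]

def Spec_solution (A : List Int) (out : Int) : Prop := out = solution_alt A
instance (A : List Int) (out : Int) : Decidable (Spec_solution A out) := by unfold Spec_solution; infer_instance

-- ===== CLAIM (what is proved, stated in full; the proofs are below) =====
def Claim_equal_solution : Prop := ∀ (A : List Int), Dom_solution A → Pre_solution A → Spec_solution A (solution A)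

-- ===== LEMMAS AND PROOFS =====

-- A's loop state after consuming xs: two running sums and the appended |t1 - t2| values
lemma pvLoop (xs : List Int) (s t : Int) (acc : List Int) :
    xs.foldl (fun (st : Int × Int × List Int) v =>
        (st.1 + v, st.2.1 - v, st.2.2 ++ [|st.1 + v - (st.2.1 - v)|])) (s, t, acc)
      = (s + xs.sum, t - xs.sum, acc ++ (pvAcc s xs).map (fun p => |2 * p - (s + t)|)) := by
  induction xs generalizing s t acc with
  | nil => simp [pvAcc]
  | cons v xs ih =>
    simp only [List.foldl_cons, pvAcc, List.map_cons, List.sum_cons]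
    rw [ih]
    have h1 : s + v + (t - v) = s + t := by ring
    rw [h1]
    simp only [Prod.mk.injEq]
    refine ⟨by ring, by ring, ?_⟩
    have h2 : |s + v - (t - v)| = |2 * (s + v) - (s + t)| := by ring_nf
    rw [h2]
    simp

-- A's result is the min of |2*p - total| over the prefix sums of A[:-1]
lemma pvSolA (A : List Int) (h2 : 2 ≤ A.length) :
    solution A = (PySem.List.min?
        ((pvAcc 0 A.dropLast).map (fun p => |2 * p - A.sum|)) (fun x => x)).getD 0 := by
  unfold solution
  by_cases hl : A.length = 2
  · match A, hl with
    | [a, b], _ =>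
      simp [pvAcc, PySem.List.min?, PySem.List.pyGetD, PySem.List.pyGet?, PySem.List.pyIdx?]
      congr 1
      ring
  · rw [if_neg (by simpa using hl)]
    dsimp only
    have hlen : ((A.length : Int) - 1) = (A.dropLast.length : Int) := by
      simp [List.length_dropLast]; omega
    rw [hlen]
    have hcongr : (PySem.List.pyRange 0 (A.dropLast.length : Int) 1).foldl
        (fun (st : Int × Int × List Int) i =>
          (st.1 + PySem.List.pyGetD A i 0, st.2.1 - PySem.List.pyGetD A i 0,
            st.2.2 ++ [|st.1 + PySem.List.pyGetD A i 0 - (st.2.1 - PySem.List.pyGetD A i 0)|]))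
        (0, A.sum, [])
        = (PySem.List.pyRange 0 (A.dropLast.length : Int) 1).foldl
        (fun (st : Int × Int × List Int) i =>
          (st.1 + PySem.List.pyGetD A.dropLast i 0, st.2.1 - PySem.List.pyGetD A.dropLast i 0,
            st.2.2 ++ [|st.1 + PySem.List.pyGetD A.dropLast i 0 - (st.2.1 - PySem.List.pyGetD A.dropLast i 0)|]))
        (0, A.sum, []) := by
      apply PySem.List.foldl_congr_mem
      intro acc i hi
      rw [PySem.List.mem_pyRange_one] at hi
      have : PySem.List.pyGetD A i 0 = PySem.List.pyGetD A.dropLast i 0 := by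
        obtain ⟨h0, h1⟩ := hi
        rw [PySem.List.pyGetD_eq_getElem A 0 h0 (by simp at h1 ⊢; omega),
            PySem.List.pyGetD_eq_getElem A.dropLast 0 h0 h1]
        simp [List.getElem_dropLast]
      rw [this]
    rw [hcongr, PySem.List.foldl_pyRange_zero_pyGetD' A.dropLast 0
      (fun (st : Int × Int × List Int) v =>
        (st.1 + v, st.2.1 - v, st.2.2 ++ [|st.1 + v - (st.2.1 - v)|])) (0, A.sum, [])]
    rw [pvLoop]
    simp

-- value characterisation of Python's min (key = identity): any member below all members is THE min
lemma pvMin_eq (xs : List Int) (m : Int) (hm : m ∈ xs) (hle : ∀ y ∈ xs, m ≤ y) :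
    PySem.List.min? xs (fun x => x) = some m := by
  cases h : PySem.List.min? xs (fun x => x) with
  | none =>
    rw [PySem.List.min?_eq_none_iff] at h
    subst h; simp at hm
  | some m' =>
    have h1 : m' ∈ xs := PySem.List.min?_mem h
    have h2 : ∀ y ∈ xs, m' ≤ y := PySem.List.min?_isMin h
    have := le_antisymm (h2 m hm) (hle m' h1)
    rw [this]

-- the bisect loop returns the first index whose doubled element reaches t (on a sorted list)
lemma pvBS_spec (Q : List Int) (t : Int) (hs : Q.Pairwise (· ≤ ·)) :
    ∀ (lo hi : Nat), lo ≤ hi → hi ≤ Q.length →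
    (∀ i, i < lo → (h : i < Q.length) → 2 * Q[i] < t) →
    (∀ i, hi ≤ i → (h : i < Q.length) → t ≤ 2 * Q[i]) →
    (pvBS Q t lo hi ≤ Q.length ∧
     (∀ i, i < pvBS Q t lo hi → (h : i < Q.length) → 2 * Q[i] < t) ∧
     (∀ i, pvBS Q t lo hi ≤ i → (h : i < Q.length) → t ≤ 2 * Q[i])) := by
  have hmono : ∀ (i j : Nat), (hij : i ≤ j) → (hj : j < Q.length) → Q[i]'(by omega) ≤ Q[j] := by
    intro i j hij hj
    rcases Nat.eq_or_lt_of_le hij with h | h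
    · subst h; rfl
    · exact (List.pairwise_iff_getElem.mp hs) i j (by omega) hj h
  intro lo hi
  induction lo, hi using pvBS.induct Q t with
  | case1 lo hi h hlt ih =>
    intro hle hhiL hlo hhi
    rw [pvBS, dif_pos h, if_pos hlt]
    have hmid : (lo + hi) / 2 < Q.length := by omega
    rw [List.getD_eq_getElem Q 0 hmid] at hlt
    refine ih (by omega) hhiL ?_ hhi
    intro i hi' h'
    calc 2 * Q[i] ≤ 2 * Q[(lo + hi) / 2] := by
            have := hmono i ((lo + hi) / 2) (by omega) hmid; omega
      _ < t := hlt
  | case2 lo hi h hge ih =>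
    intro hle hhiL hlo hhi
    rw [pvBS, dif_pos h, if_neg hge]
    have hmid : (lo + hi) / 2 < Q.length := by omega
    rw [List.getD_eq_getElem Q 0 hmid] at hge
    rw [not_lt] at hge
    refine ih (by omega) (by omega) hlo ?_
    intro i hi' h'
    calc t ≤ 2 * Q[(lo + hi) / 2] := hge
      _ ≤ 2 * Q[i] := by have := hmono ((lo + hi) / 2) i hi' h'; omega
  | case3 lo hi h =>
    intro hle hhiL hlo hhi
    rw [pvBS, dif_neg h]
    exact ⟨by omega, hlo, fun i hi' h' => hhi i (by omega) h'⟩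

-- the core: for nonempty P ~ Q with Q sorted and k the bisect index, the min of |2*p - t| over P
-- is the min of B's (at most two) bracketing candidates
lemma pvCore (Q P : List Int) (t : Int) (k : Nat) (hperm : Q.Perm P) (hs : Q.Pairwise (· ≤ ·))
    (hP : P ≠ []) (hkL : k ≤ Q.length)
    (Hlt : ∀ i, i < k → (h : i < Q.length) → 2 * Q[i] < t)
    (Hge : ∀ i, k ≤ i → (h : i < Q.length) → t ≤ 2 * Q[i]) :
    (PySem.List.min? (P.map (fun p => |2 * p - t|)) (fun x => x)).getD 0 =
    (PySem.List.min? ((if 0 < k then [t - 2 * Q.getD (k - 1) 0] else []) ++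
                      (if k < Q.length then [2 * Q.getD k 0 - t] else []))
      (fun x => x)).getD 0 := by
  have hn : 0 < Q.length := by
    rcases Nat.eq_zero_or_pos Q.length with h | h
    · exact absurd (hperm.symm.length_eq.trans h) (by simpa using hP)
    · exact h
  have hmain : ∀ (m : Int),
      (m ∈ Q.map (fun p => |2 * p - t|)) → (∀ y ∈ Q.map (fun p => |2 * p - t|), m ≤ y) →
      PySem.List.min? (P.map (fun p => |2 * p - t|)) (fun x => x) = some m := by
    intro m hm hle
    apply pvMin_eq
    · exact (List.Perm.mem_iff (hperm.map _)).mp hm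
    · intro y hy
      exact hle y ((List.Perm.mem_iff (hperm.map _)).mpr hy)
  have hbound : ∀ i, (h : i < Q.length) →
      (i < k → |2 * Q[i] - t| = t - 2 * Q[i]) ∧ (k ≤ i → |2 * Q[i] - t| = 2 * Q[i] - t) := by
    intro i h
    constructor
    · intro hik; have := Hlt i hik h; rw [abs_of_neg (by omega)]; ring
    · intro hik; have := Hge i hik h; rw [abs_of_nonneg (by omega)]
  have hpair := List.pairwise_iff_getElem.mp hs
  by_cases hk0 : k = 0
  · -- cands = [2*Q[0] - t]
    subst hk0
    rw [if_neg (lt_irrefl 0), if_pos hn, List.nil_append, List.getD_eq_getElem Q 0 hn]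
    rw [hmain (2 * Q[0] - t) ?_ ?_]
    · simp [PySem.List.min?]
    · have hmem : |2 * Q[0] - t| ∈ Q.map (fun p => |2 * p - t|) :=
        List.mem_map_of_mem (List.getElem_mem hn)
      exact ((hbound 0 hn).2 (by omega)) ▸ hmem
    · intro y hy
      obtain ⟨q, hq, rfl⟩ := List.mem_map.mp hy
      obtain ⟨i, hi, rfl⟩ := List.mem_iff_getElem.mp hq
      rw [(hbound i hi).2 (by omega)]
      have hle0i : Q[0] ≤ Q[i] := by
        rcases Nat.eq_zero_or_pos i with h | h
        · subst h; rfl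
        · exact hpair 0 i hn hi h
      omega
  · by_cases hkn : k = Q.length
    · -- cands = [t - 2*Q[k-1]]
      have hk1 : k - 1 < Q.length := by omega
      rw [if_pos (by omega : 0 < k), if_neg (by omega : ¬ k < Q.length), List.append_nil,
          List.getD_eq_getElem Q 0 hk1]
      rw [hmain (t - 2 * Q[k - 1]) ?_ ?_]
      · simp [PySem.List.min?]
      · have hmem : |2 * Q[k-1] - t| ∈ Q.map (fun p => |2 * p - t|) :=
          List.mem_map_of_mem (List.getElem_mem hk1)
        exact ((hbound (k-1) hk1).1 (by omega)) ▸ hmem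
      · intro y hy
        obtain ⟨q, hq, rfl⟩ := List.mem_map.mp hy
        obtain ⟨i, hi, rfl⟩ := List.mem_iff_getElem.mp hq
        rw [(hbound i hi).1 (by omega)]
        have hlei : Q[i] ≤ Q[k-1] := by
          rcases Nat.lt_or_ge i (k-1) with h | h
          · exact hpair i (k-1) hi hk1 h
          · have : i = k - 1 := by omega
            subst this; rfl
        omega
    · -- 0 < k < Q.length: cands = [t - 2*Q[k-1], 2*Q[k] - t]
      have hkpos : 0 < k := by omega
      have hklt : k < Q.length := by omega
      have hk1 : k - 1 < Q.length := by omega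
      rw [if_pos hkpos, if_pos hklt, List.getD_eq_getElem Q 0 hk1, List.getD_eq_getElem Q 0 hklt,
          List.singleton_append]
      have hc1 : |2 * Q[k-1] - t| = t - 2 * Q[k-1] := (hbound (k-1) hk1).1 (by omega)
      have hc2 : |2 * Q[k] - t| = 2 * Q[k] - t := (hbound k hklt).2 le_rfl
      have hminlist : PySem.List.min? [t - 2 * Q[k-1], 2 * Q[k] - t] (fun x => x)
          = some (min (t - 2 * Q[k-1]) (2 * Q[k] - t)) := by
        simp only [PySem.List.min?, List.foldl]
        split_ifs with h
        · rw [min_eq_right (by omega)]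
        · rw [min_eq_left (by omega)]
      rw [hmain (min (t - 2 * Q[k-1]) (2 * Q[k] - t)) ?_ ?_]
      · rw [hminlist]
      · rcases le_total (t - 2 * Q[k-1]) (2 * Q[k] - t) with h | h
        · rw [min_eq_left h]
          have hmem : |2 * Q[k-1] - t| ∈ Q.map (fun p => |2 * p - t|) :=
            List.mem_map_of_mem (List.getElem_mem hk1)
          exact hc1 ▸ hmem
        · rw [min_eq_right h]
          have hmem : |2 * Q[k] - t| ∈ Q.map (fun p => |2 * p - t|) :=
            List.mem_map_of_mem (List.getElem_mem hklt)
          exact hc2 ▸ hmem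
      · intro y hy
        obtain ⟨q, hq, rfl⟩ := List.mem_map.mp hy
        obtain ⟨i, hi, rfl⟩ := List.mem_iff_getElem.mp hq
        rcases Nat.lt_or_ge i k with h | h
        · rw [(hbound i hi).1 h]
          have hlei : Q[i] ≤ Q[k-1] := by
            rcases Nat.lt_or_ge i (k-1) with h' | h'
            · exact hpair i (k-1) hi hk1 h'
            · have : i = k - 1 := by omega
              subst this; rfl
          have := min_le_left (t - 2 * Q[k-1]) (2 * Q[k] - t)
          omega
        · rw [(hbound i hi).2 h]
          have hlei : Q[k] ≤ Q[i] := by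
            rcases Nat.eq_or_lt_of_le h with h' | h'
            · subst h'; rfl
            · exact hpair k i hklt hi h'
          have := min_le_right (t - 2 * Q[k-1]) (2 * Q[k] - t)
          omega

-- ===== VERDICT (by name: the statement is the Claim_ definition above) =====
theorem solution_spec : Claim_equal_solution := by
  intro A _ hpre
  unfold Pre_solution at hpre
  unfold Spec_solution solution_alt
  rw [PySem.List.slice_to_neg_one]
  dsimp only
  have hPne : pvAcc 0 A.dropLast ≠ [] := by
    have hdne : A.dropLast ≠ [] := by
      intro h
      have := congrArg List.length h
      simp [List.length_dropLast] at this
      omega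
    cases hA : A.dropLast with
    | nil => exact absurd hA hdne
    | cons x xs => simp [pvAcc]
  have hs := PySem.List.sorted_pairwise (pvAcc 0 A.dropLast) (fun x => x)
  have hperm := PySem.List.sorted_perm (pvAcc 0 A.dropLast) (fun x => x) false
  obtain ⟨hkL, Hlt, Hge⟩ := pvBS_spec (PySem.List.sorted (pvAcc 0 A.dropLast) (fun x => x) false)
      A.sum hs 0 _ (Nat.zero_le _) le_rfl
      (fun i hi h => absurd hi (Nat.not_lt_zero i))
      (fun i hge h => absurd hge (by omega))
  rw [pvSolA A hpre]
  exact pvCore _ _ A.sum _ hperm hs hPne hkL Hlt Hge
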